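-- pv_equiv track=rewrite | github.com/isaac-sim/IsaacLab | scripts/reinforcement_learning/ray/grok_cluster_with_kubectl.py | check_clusters_running
-- ===== SOURCE A (Python) =====
-- def check_clusters_running(pods: list, clusters: set) -> bool:
--     """
--     Check that all of the pods in all provided clusters are running.
--
--     Args:
--         pods (list): A list of tuples where each tuple contains the pod name and its status.
--         clusters (set): A set of cluster names to check.
--
--     Returns:
--         bool: True if all pods in any of the clusters are running, False otherwise.
--     """
--     clusters_running = False
--     for cluster in clusters:
--         cluster_pods = [p for p in pods if p[0].startswith(cluster)]
--         total_pods = len(cluster_pods)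
--         running_pods = len([p for p in cluster_pods if p[1] == "Running"])
--         if running_pods == total_pods and running_pods > 0:
--             clusters_running = True
--             break
--     return clusters_running
-- ===== SOURCE B (Python) =====
-- def check_clusters_running(pods: list, clusters: set) -> bool:
--     """Single pass over pods building a per-cluster [total, running] table, then one aggregate check."""
--     counts = {c: [0, 0] for c in clusters}
--     for name, status in pods:
--         for c in clusters:
--             if name.startswith(c):
--                 counts[c][0] += 1
--                 if status == "Running":
--                     counts[c][1] += 1
--     return any(total > 0 and running == total for total, running in counts.values())
-- ===== Notes on version B (the rewrite author's own statement) =====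
-- stated objective: alternative
-- what changed: Replaced the per-cluster early-break loop that builds two filtered pod lists per cluster with a single pass over pods maintaining a dict of [total, running] counters per cluster, followed by one aggregate any() over the table.
import Mathlib
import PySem

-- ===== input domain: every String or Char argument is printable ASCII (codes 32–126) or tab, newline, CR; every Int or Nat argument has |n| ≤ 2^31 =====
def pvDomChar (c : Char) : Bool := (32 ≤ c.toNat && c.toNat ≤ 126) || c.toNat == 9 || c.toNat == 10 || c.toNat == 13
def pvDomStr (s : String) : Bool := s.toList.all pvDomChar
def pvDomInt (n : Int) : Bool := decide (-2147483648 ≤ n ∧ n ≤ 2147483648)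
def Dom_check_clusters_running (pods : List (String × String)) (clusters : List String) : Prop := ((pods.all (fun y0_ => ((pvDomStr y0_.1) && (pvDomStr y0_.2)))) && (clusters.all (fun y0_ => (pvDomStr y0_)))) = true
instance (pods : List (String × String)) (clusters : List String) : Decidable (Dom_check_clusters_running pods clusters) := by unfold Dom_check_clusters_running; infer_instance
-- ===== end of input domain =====

-- B replaces A's per-cluster filtered rescans (with early break) by one pass over pods
-- maintaining a dict of (total, running) counters per cluster, then one aggregate check
-- (objective: alternative decomposition, same asymptotic cost).

-- ===== PORT A =====
-- the 'for cluster in clusters' loop with break, transliterated as structural recursion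
def ccrLoopA (pods : List (String × String)) : List String → Bool
  | [] => false
  | cluster :: rest =>
    let cluster_pods := pods.filter (fun p => PySem.Str.startswith p.1 cluster)
    let total_pods := cluster_pods.length
    let running_pods := (cluster_pods.filter (fun p => p.2 == "Running")).length
    if running_pods == total_pods && running_pods > 0 then true
    else ccrLoopA pods rest

def check_clusters_running (pods : List (String × String)) (clusters : List String) : Bool :=
  ccrLoopA pods clusters

-- ===== PORT B =====
-- one pod's update of the counter table: 'for c in clusters: if name.startswith(c): …'
def ccrStepB (clusters : List String) (d : PySem.Dict String (Nat × Nat))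
    (p : String × String) : PySem.Dict String (Nat × Nat) :=
  clusters.foldl (fun d c =>
    if PySem.Str.startswith p.1 c then
      let d := d.modify c (0, 0) (fun tr => (tr.1 + 1, tr.2))
      if p.2 == "Running" then d.modify c (0, 0) (fun tr => (tr.1, tr.2 + 1)) else d
    else d) d

def check_clusters_running_alt (pods : List (String × String)) (clusters : List String) : Bool :=
  let counts0 : PySem.Dict String (Nat × Nat) :=
    clusters.foldl (fun d c => d.insert c (0, 0)) PySem.Dict.empty
  let counts := pods.foldl (ccrStepB clusters) counts0
  counts.values.any (fun tr => decide (tr.1 > 0) && tr.2 == tr.1)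

-- ===== PRECONDITION & SPEC =====
-- Pre_: 'clusters' models a Python set, so its List-of-distinct-elements encoding has no duplicates.
def Pre_check_clusters_running (pods : List (String × String)) (clusters : List String) : Prop :=
  clusters.Nodup
instance (pods : List (String × String)) (clusters : List String) : Decidable (Pre_check_clusters_running pods clusters) := by unfold Pre_check_clusters_running; infer_instance

def pvWitness_check_clusters_running : (List (String × String)) × List String :=
  ([("c1-a", "Running"), ("c2-b", "Pending")], ["c1", "c2"])

def Spec_check_clusters_running (pods : List (String × String)) (clusters : List String) (out : Bool) : Prop := out = check_clusters_running_alt pods clusters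
instance (pods : List (String × String)) (clusters : List String) (out : Bool) : Decidable (Spec_check_clusters_running pods clusters out) := by unfold Spec_check_clusters_running; infer_instance

-- ===== CLAIM (what is proved, stated in full; the proofs are below) =====
def Claim_equal_check_clusters_running : Prop := ∀ (pods : List (String × String)) (clusters : List String), Dom_check_clusters_running pods clusters → Pre_check_clusters_running pods clusters → Spec_check_clusters_running pods clusters (check_clusters_running pods clusters)

-- ===== LEMMAS AND PROOFS =====

-- the per-cluster totals both programs compute
def ccrT (pods : List (String × String)) (c : String) : Nat :=
  pods.countP (fun p => PySem.Str.startswith p.1 c)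
def ccrR (pods : List (String × String)) (c : String) : Nat :=
  pods.countP (fun p => p.2 == "Running" && PySem.Str.startswith p.1 c)

-- A's loop is an 'any' over clusters of the per-cluster test
theorem ccrLoopA_eq_any (pods : List (String × String)) (clusters : List String) :
    ccrLoopA pods clusters
      = clusters.any (fun c => (ccrR pods c == ccrT pods c) && ccrR pods c > 0) := by
  induction clusters with
  | nil => rfl
  | cons c rest ih =>
    simp only [ccrLoopA]
    rw [ih, List.any_cons]
    have hR : ((pods.filter (fun p => PySem.Str.startswith p.1 c)).filter
        (fun p => p.2 == "Running")).length = ccrR pods c := by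
      simp [ccrR, ← List.countP_eq_length_filter]
    have hT : (pods.filter (fun p => PySem.Str.startswith p.1 c)).length = ccrT pods c := by
      simp [ccrT, ← List.countP_eq_length_filter]
    rw [hR, hT]
    cases h : (ccrR pods c == ccrT pods c && decide (ccrR pods c > 0)) <;> simp

-- getD through one pod's inner loop, key not hit
theorem getD_ccrStepB_of_not_mem (p : String × String) (d : PySem.Dict String (Nat × Nat))
    (l : List String) (c : String) (hc : c ∉ l) :
    (l.foldl (fun d c =>
      if PySem.Str.startswith p.1 c then
        let d := d.modify c (0, 0) (fun tr => (tr.1 + 1, tr.2))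
        if p.2 == "Running" then d.modify c (0, 0) (fun tr => (tr.1, tr.2 + 1)) else d
      else d) d).getD c (0, 0) = d.getD c (0, 0) := by
  induction l generalizing d with
  | nil => rfl
  | cons c' rest ih =>
    simp only [List.mem_cons, not_or] at hc
    simp only [List.foldl_cons]
    rw [ih _ hc.2]
    split_ifs <;> simp [PySem.Dict.getD_modify, hc.1]

-- getD through one pod's inner loop, key hit (distinct clusters)
theorem getD_ccrStepB_of_mem (p : String × String) (d : PySem.Dict String (Nat × Nat))
    (l : List String) (hl : l.Nodup) (c : String) (hc : c ∈ l) :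
    (ccrStepB l d p).getD c (0, 0)
      = (if PySem.Str.startswith p.1 c then
          ((d.getD c (0, 0)).1 + 1,
           (d.getD c (0, 0)).2 + (if p.2 == "Running" then 1 else 0))
         else d.getD c (0, 0)) := by
  induction l generalizing d with
  | nil => cases hc
  | cons c' rest ih =>
    simp only [List.nodup_cons] at hl
    simp only [ccrStepB, List.foldl_cons] at *
    rcases List.mem_cons.mp hc with h | h
    · subst h
      rw [getD_ccrStepB_of_not_mem p _ rest c hl.1]
      by_cases h1 : (PySem.Str.startswith p.1 c) = true
      · simp only [h1, if_true]
        by_cases h2 : (p.2 == "Running") = true <;>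
          simp [h2, PySem.Dict.getD_modify_self]
      · rw [if_neg h1, if_neg h1]
    · have hne : c ≠ c' := fun he => hl.1 (he ▸ h)
      rw [ih _ hl.2 h]
      have hstep : ((if PySem.Str.startswith p.1 c' then
          let d' := d.modify c' (0, 0) (fun tr => (tr.1 + 1, tr.2))
          (if p.2 == "Running" then d'.modify c' (0, 0) (fun tr => (tr.1, tr.2 + 1)) else d')
        else d)).getD c (0, 0) = d.getD c (0, 0) := by
        split_ifs <;> simp [PySem.Dict.getD_modify, hne]
      rw [hstep]

-- folding the whole pod list: the counter at c is exactly (ccrT, ccrR)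
theorem getD_fold_pods (clusters : List String) (hnd : clusters.Nodup)
    (c : String) (hc : c ∈ clusters) (pods : List (String × String))
    (d : PySem.Dict String (Nat × Nat)) :
    (pods.foldl (ccrStepB clusters) d).getD c (0, 0)
      = ((d.getD c (0, 0)).1 + ccrT pods c, (d.getD c (0, 0)).2 + ccrR pods c) := by
  induction pods generalizing d with
  | nil => simp [ccrT, ccrR]
  | cons p rest ih =>
    simp only [List.foldl_cons]
    rw [ih, getD_ccrStepB_of_mem p d clusters hnd c hc]
    simp only [ccrT, ccrR, List.countP_cons]
    split_ifs with h1 h2 <;> simp_all <;> omega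

-- the initial table: getD with default (0,0) is (0,0) everywhere
theorem getD_init (l : List String) (d : PySem.Dict String (Nat × Nat))
    (h : ∀ c, d.getD c (0, 0) = (0, 0)) (c : String) :
    (l.foldl (fun d c => d.insert c ((0 : Nat), (0 : Nat))) d).getD c (0, 0) = (0, 0) := by
  induction l generalizing d with
  | nil => exact h c
  | cons c' rest ih =>
    simp only [List.foldl_cons]
    refine ih _ (fun x => ?_)
    rw [PySem.Dict.getD_insert]
    split_ifs <;> simp [h]

-- keys of the initial table are the (distinct) clusters, in order
theorem keys_init (l : List String) (hl : l.Nodup) (d : PySem.Dict String (Nat × Nat))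
    (hdisj : ∀ c ∈ l, c ∉ d.keys) :
    (l.foldl (fun d c => d.insert c ((0 : Nat), (0 : Nat))) d).keys = d.keys ++ l := by
  induction l generalizing d with
  | nil => simp
  | cons c rest ih =>
    simp only [List.nodup_cons] at hl
    simp only [List.foldl_cons]
    have hnc : d.contains c = false := by
      simp [PySem.Dict.contains_eq_decide_mem_keys, hdisj c (by simp)]
    rw [ih hl.2 _ (fun x hx => ?_)]
    · rw [PySem.Dict.keys_insert_of_not_contains _ _ hnc]; simp
    · rw [PySem.Dict.keys_insert_of_not_contains _ _ hnc]
      simp only [List.mem_append, List.mem_singleton, not_or]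
      exact ⟨hdisj x (by simp [hx]), fun he => hl.1 (he ▸ hx)⟩

-- one pod's update never changes the key list (every cluster is already a key)
theorem keys_ccrStepB (clusters : List String) (p : String × String)
    (d : PySem.Dict String (Nat × Nat)) (h : ∀ c ∈ clusters, c ∈ d.keys) :
    (ccrStepB clusters d p).keys = d.keys := by
  unfold ccrStepB
  induction clusters generalizing d with
  | nil => rfl
  | cons c rest ih =>
    simp only [List.foldl_cons]
    have hkeys : ∀ (f : Nat × Nat → Nat × Nat) (d : PySem.Dict String (Nat × Nat)),
        c ∈ d.keys → (d.modify c (0, 0) f).keys = d.keys := by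
      intro f d hc
      rw [PySem.Dict.keys_modify, PySem.Dict.keys_insert_of_contains]
      simp [PySem.Dict.contains_eq_decide_mem_keys, hc]
    have hc := h c (by simp)
    have hstep : ((if PySem.Str.startswith p.1 c then
        let d' := d.modify c (0, 0) (fun tr => (tr.1 + 1, tr.2))
        (if p.2 == "Running" then d'.modify c (0, 0) (fun tr => (tr.1, tr.2 + 1)) else d')
      else d)).keys = d.keys := by
      split_ifs <;>
        simp only [hkeys _ _ hc, hkeys _ _ ((hkeys _ _ hc).symm ▸ hc)]
    rw [ih _ (fun x hx => by rw [hstep]; exact h x (by simp [hx]))]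
    exact hstep

-- the whole pod pass keeps the key list
theorem keys_fold_pods (clusters : List String) (pods : List (String × String))
    (d : PySem.Dict String (Nat × Nat)) (h : ∀ c ∈ clusters, c ∈ d.keys) :
    (pods.foldl (ccrStepB clusters) d).keys = d.keys := by
  induction pods generalizing d with
  | nil => rfl
  | cons p rest ih =>
    simp only [List.foldl_cons]
    have hs := keys_ccrStepB clusters p d h
    rw [ih _ (by rw [hs]; exact h)]
    exact hs

-- ===== VERDICT (by name: the statement is the Claim_ definition above) =====
theorem check_clusters_running_spec : Claim_equal_check_clusters_running := by
  intro pods clusters _ hnd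
  simp only [Spec_check_clusters_running, check_clusters_running, check_clusters_running_alt]
  rw [ccrLoopA_eq_any]
  have hkeys0 : (clusters.foldl (fun d c => d.insert c ((0 : Nat), (0 : Nat)))
      PySem.Dict.empty).keys = clusters := by
    rw [keys_init clusters hnd _ (by simp [PySem.Dict.keys_empty])]
    simp [PySem.Dict.keys_empty]
  have hkeysF : (pods.foldl (ccrStepB clusters)
      (clusters.foldl (fun d c => d.insert c ((0 : Nat), (0 : Nat))) PySem.Dict.empty)).keys
      = clusters := by
    rw [keys_fold_pods clusters pods _ (by rw [hkeys0]; exact fun c hc => hc)]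
    exact hkeys0
  rw [PySem.Dict.values_eq_map_keys _ (by rw [hkeysF]; exact hnd) ((0 : Nat), (0 : Nat))]
  rw [hkeysF, List.any_map]
  refine (PySem.List.any_congr_mem (fun c hc => ?_)).symm
  rw [Function.comp_apply,
    getD_fold_pods clusters hnd c hc pods _,
    getD_init clusters PySem.Dict.empty (fun c => by simp [PySem.Dict.getD_empty]) c]
  simp only [Nat.zero_add]
  by_cases h : ccrR pods c = ccrT pods c
  · simp [h]
  · rw [show (ccrR pods c == ccrT pods c) = false from by simp [h]]
    simp
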